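-- pv_equiv track=rewrite | github.com/Te-H0/Algorithm | programmers/258709.py | solution
-- ===== SOURCE A (Python) =====
-- from itertools import combinations, product
-- from bisect import bisect_left, bisect_right
--
-- def solution(dice):
--     dice_number = [i+1 for i in range(len(dice))]
--
--     #[(1,2), (1,3),,,,]
--     comb_dice_number = list(combinations(dice_number, len(dice) // 2))
--
--     # [(1,2), (1,3)] => [[[1의 주사위 값],[2의 주사위 값]], [[1의 주사위 값],[2의 주사위 값]]]
--     comb_dice_element = []
--     for cdn in comb_dice_number:
--         tmp = []
--         for c in cdn:
--             tmp.append(dice[c-1])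
--         comb_dice_element.append(tmp)
--
--     # [[[1의 주사위 값],[2의 주사위 값]], [[1의 주사위 값],[2의 주사위 값]]]
--     # -> [[1,2 주사위 값 서로 모두 합], [2,3 주사위 값 서로 모두 합]]
--     comb_dice_sum = []
--     for cde in comb_dice_element:
--         comb_dice_sum.append(sorted([sum(i) for i in product(*cde)]))
--
--     result = [[0,0] for _ in range(len(comb_dice_number))] # 승, 패
--
--
--     for i in range(len(comb_dice_number)//2):
--         a_player = comb_dice_sum[i]
--         b_player = comb_dice_sum[-(i+1)]
--
--         # 이분 탐색 통해서 a의 값이 b의 어느 인덱스에 위치하는지 찾기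
--         # -> 3번째 있으면 0부터니까 3번 이긴것
--         # -> b의 길이 - bisect_right하면 진것
--         for a in a_player:
--             a_win = bisect_left(b_player,a)
--             a_lose = len(b_player) -bisect_right(b_player,a)
--             result[i][0] += a_win
--             result[i][1] += a_lose
--             result[-(i+1)][0] += a_lose
--             result[-(i+1)][1] += a_win
--
--
--     idx = 0
--     max_win = 0
--     for i, re in enumerate(result):
--         if re[0] > max_win:
--             idx = i
--             max_win = re[0]
--
--     return list(comb_dice_number[idx])
-- ===== SOURCE B (Python) =====
-- from itertools import combinations
-- from bisect import bisect_left
--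
-- def solution(dice):
--     n = len(dice)
--     combos = list(combinations(range(1, n + 1), n // 2))
--     C = len(combos)
--
--     # per combination: histogram of team sums (built by convolution), its sorted
--     # distinct sums, and prefix sums of the counts
--     data = []
--     for combo in combos:
--         hist = {0: 1}
--         for c in combo:
--             new = {}
--             for s, cnt in hist.items():
--                 for f in dice[c - 1]:
--                     new[s + f] = new.get(s + f, 0) + cnt
--             hist = new
--         ks = sorted(hist)
--         run = 0
--         pre = [0]
--         for k in ks:
--             run += hist[k]
--             pre.append(run)
--         data.append((hist, ks, pre))
--
--     def beats(x, y):
--         hi, ki, _ = x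
--         _, kj, pj = y
--         total = 0
--         for s in ki:
--             total += hi[s] * pj[bisect_left(kj, s)]
--         return total
--
--     wins = [0] * C
--     for i in range(C // 2):
--         j = C - 1 - i
--         wins[i] = beats(data[i], data[j])
--         wins[j] = beats(data[j], data[i])
--
--     best = wins.index(max(wins))
--     return list(combos[best])
-- ===== Notes on version B (the rewrite author's own statement) =====
-- stated objective: faster
-- what changed: B replaces A's per-pairing Cartesian product of all face tuples (6^(n/2) sums, sorted, then probed one-by-one with bisect) by a sum histogram built once per team via dice-by-dice convolution of a dict, and compares two teams by summing count products over histogram entries, so the exponential product enumeration and the sorting disappear.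
import Mathlib
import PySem

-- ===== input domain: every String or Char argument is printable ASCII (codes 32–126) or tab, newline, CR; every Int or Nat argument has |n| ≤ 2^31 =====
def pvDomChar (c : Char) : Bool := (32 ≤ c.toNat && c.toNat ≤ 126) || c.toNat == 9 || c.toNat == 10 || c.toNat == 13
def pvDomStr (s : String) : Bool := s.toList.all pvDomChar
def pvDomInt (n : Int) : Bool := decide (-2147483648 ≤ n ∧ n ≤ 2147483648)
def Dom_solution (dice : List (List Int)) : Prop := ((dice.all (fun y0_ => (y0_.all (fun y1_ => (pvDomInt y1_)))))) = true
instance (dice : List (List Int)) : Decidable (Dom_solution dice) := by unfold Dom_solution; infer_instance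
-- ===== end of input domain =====

-- B replaces A's per-team Cartesian product of die faces (sorted, then probed with bisect) by a
-- convolution-built histogram of team sums compared pairwise through weighted counts; equal output proved.

-- ===== PORT A =====
-- itertools.combinations (lexicographic order; exact hand port, both Pythons call it)
def pyCombinations {α : Type} : List α → Nat → List (List α)
  | _, 0 => [[]]
  | [], _ + 1 => []
  | x :: xs, r + 1 => (pyCombinations xs r).map (x :: ·) ++ pyCombinations xs (r + 1)

-- itertools.product (lexicographic order, last factor fastest; exact hand port)
def pyProduct {α : Type} : List (List α) → List (List α)
  | [] => [[]]
  | l :: ls => l.flatMap (fun x => (pyProduct ls).map (x :: ·))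

def solution (dice : List (List Int)) : List Int :=
  let diceNumber : List Int := (PySem.List.pyRange 0 (PySem.List.len dice) 1).map (fun i => i + 1)
  -- r = len(dice)//2 is nonnegative, so .toNat is exact
  let combDiceNumber : List (List Int) := pyCombinations diceNumber (PySem.Int.floordiv (PySem.List.len dice) 2).toNat
  let combDiceElement : List (List (List Int)) := combDiceNumber.map (fun cdn => cdn.map (fun c => PySem.List.pyGetD dice (c - 1) []))
  let combDiceSum : List (List Int) := combDiceElement.map (fun cde => PySem.List.sorted ((pyProduct cde).map (fun t => t.sum)) (fun x => x) false)
  let result0 : List (Int × Int) := (List.range combDiceNumber.length).map (fun _ => ((0 : Int), (0 : Int)))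
  let result := (PySem.List.pyRange 0 (PySem.Int.floordiv (PySem.List.len combDiceNumber) 2) 1).foldl (fun res i =>
    let aPlayer := PySem.List.pyGetD combDiceSum i []
    let bPlayer := PySem.List.pyGetD combDiceSum (-(i + 1)) []
    aPlayer.foldl (fun r a =>
      let aWin : Int := (PySem.List.bisectLeft bPlayer a : Int)
      let aLose : Int := PySem.List.len bPlayer - (PySem.List.bisectRight bPlayer a : Int)
      let r1 := PySem.List.pySetD r i ((PySem.List.pyGetD r i (0, 0)).1 + aWin, (PySem.List.pyGetD r i (0, 0)).2 + aLose)
      PySem.List.pySetD r1 (-(i + 1)) ((PySem.List.pyGetD r1 (-(i + 1)) (0, 0)).1 + aLose, (PySem.List.pyGetD r1 (-(i + 1)) (0, 0)).2 + aWin)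
    ) res) result0
  let idxMax := (PySem.List.enumerate result 0).foldl (fun (st : Int × Int) p => if p.2.1 > st.2 then (p.1, p.2.1) else st) ((0 : Int), (0 : Int))
  PySem.List.pyGetD combDiceNumber idxMax.1 []

-- ===== PORT B =====
-- one convolution step: histogram of (old sum + face) weighted by old multiplicities
def convStep (hist : PySem.Dict Int Int) (faces : List Int) : PySem.Dict Int Int :=
  hist.items.foldl (fun new p => faces.foldl (fun new f => new.insert (p.1 + f) (new.getD (p.1 + f) 0 + p.2)) new) PySem.Dict.empty

def convHist (dice : List (List Int)) (combo : List Int) : PySem.Dict Int Int :=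
  combo.foldl (fun hist c => convStep hist (PySem.List.pyGetD dice (c - 1) [])) (PySem.Dict.empty.insert 0 1)

-- ks = sorted(hist): the distinct team sums in increasing order
def sortedKeys (h : PySem.Dict Int Int) : List Int := PySem.List.sorted h.keys (fun x => x) false

-- run = 0; pre = [0]; for k in ks: run += hist[k]; pre.append(run)
def prefOf (h : PySem.Dict Int Int) : List Int :=
  ((sortedKeys h).foldl
    (fun (st : Int × List Int) k => (st.1 + h.getD k 0, st.2 ++ [st.1 + h.getD k 0])) (0, [0])).2

def comboData (dice : List (List Int)) (combo : List Int) :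
    PySem.Dict Int Int × List Int × List Int :=
  let hist := convHist dice combo
  (hist, sortedKeys hist, prefOf hist)

-- total += hi[s] * pj[bisect_left(kj, s)]   (hi[s] never raises: s is a key of hi;
-- pj has len(kj)+1 entries and bisect_left ≤ len(kj), so the list index never raises)
def beats (x y : PySem.Dict Int Int × List Int × List Int) : Int :=
  x.2.1.foldl (fun total s =>
    total + x.1.getD s 0 * PySem.List.pyGetD y.2.2 ((PySem.List.bisectLeft y.2.1 s : Nat) : Int) 0) 0

def solution_alt (dice : List (List Int)) : List Int :=
  let combos := pyCombinations (PySem.List.pyRange 1 (PySem.List.len dice + 1) 1) (PySem.Int.floordiv (PySem.List.len dice) 2).toNat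
  let data := combos.map (fun combo => comboData dice combo)
  let wins0 : List Int := List.replicate combos.length 0
  let wins := (PySem.List.pyRange 0 (PySem.Int.floordiv (PySem.List.len combos) 2) 1).foldl (fun w i =>
    let j : Int := (combos.length : Int) - 1 - i
    let wa := beats (PySem.List.pyGetD data i (PySem.Dict.empty, [], [])) (PySem.List.pyGetD data j (PySem.Dict.empty, [], []))
    let wb := beats (PySem.List.pyGetD data j (PySem.Dict.empty, [], [])) (PySem.List.pyGetD data i (PySem.Dict.empty, [], []))
    PySem.List.pySetD (PySem.List.pySetD w i wa) j wb) wins0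
  -- wins is nonempty, so Python's max()/index() cannot raise; the defaults are dead
  let m := (PySem.List.max? wins (fun x => x)).getD 0
  PySem.List.pyGetD combos (((PySem.List.index? wins m).getD 0 : Nat) : Int) []

-- ===== PRECONDITION & SPEC =====
def Spec_solution (dice : List (List Int)) (out : List Int) : Prop := out = solution_alt dice
instance (dice : List (List Int)) (out : List Int) : Decidable (Spec_solution dice out) := by unfold Spec_solution; infer_instance

-- ===== CLAIM (what is proved, stated in full; the proofs are below) =====
def Claim_equal_solution : Prop := ∀ (dice : List (List Int)), Dom_solution dice → Spec_solution dice (solution dice)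

-- ===== LEMMAS AND PROOFS =====

-- the faces of the dice selected by a combination (1-based numbers)
def facesOf (dice : List (List Int)) (combo : List Int) : List (List Int) :=
  combo.map (fun c => PySem.List.pyGetD dice (c - 1) [])

-- all team sums of a selection, with multiplicity (A's product-of-faces sums, unsorted)
def prodSums (cde : List (List Int)) : List Int := (pyProduct cde).map (fun t => t.sum)

-- "dict h is the histogram of the multiset L"
def HistRep (h : PySem.Dict Int Int) (L : List Int) : Prop :=
  h.keys.Nodup ∧ ∀ x : Int, h.getD x 0 = L.count x

-- number of (a, b) ∈ A × B with b < a
def pairWins (A B : List Int) : Int :=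
  (A.map (fun a => ((B.countP (fun y => decide (y < a)) : Nat) : Int))).sum

lemma floordiv_two_nat (n : Nat) : PySem.Int.floordiv (n : Int) 2 = ((n / 2 : Nat) : Int) := by
  have h : (2 : Int) = ((2 : Nat) : Int) := rfl
  rw [h, PySem.Int.floordiv_natCast]

lemma range_shift (n : Nat) :
    (PySem.List.pyRange 0 (n : Int) 1).map (fun i => i + 1) = PySem.List.pyRange 1 ((n : Int) + 1) 1 := by
  rw [PySem.List.pyRange_one, PySem.List.pyRange_one, List.map_map]
  have h1 : ((n : Int) - 0).toNat = n := by omega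
  have h2 : ((n : Int) + 1 - 1).toNat = n := by omega
  rw [h1, h2]
  apply List.map_congr_left
  intro k _
  simp [add_comm]

lemma countP_of_bounds (xs : List Int) (P : Int → Bool) (r : Nat) (hr : r ≤ xs.length)
    (h1 : ∀ j (hj : j < xs.length), j < r → P xs[j])
    (h2 : ∀ j (hj : j < xs.length), r ≤ j → ¬ P xs[j]) : xs.countP P = r := by
  have hsplit : xs = xs.take r ++ xs.drop r := (List.take_append_drop r xs).symm
  conv_lhs => rw [hsplit]
  rw [List.countP_append]
  have htake : (xs.take r).countP P = (xs.take r).length := by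
    rw [List.countP_eq_length]
    intro a ha
    obtain ⟨i, hi, hEq⟩ := List.getElem_of_mem ha
    have hir : i < r := by
      have := hi; simp [List.length_take] at this; omega
    have hilen : i < xs.length := by
      have := hi; simp [List.length_take] at this; omega
    rw [← hEq, List.getElem_take]
    exact h1 i hilen hir
  have hdrop : (xs.drop r).countP P = 0 := by
    rw [List.countP_eq_zero]
    intro a ha
    obtain ⟨i, hi, hEq⟩ := List.getElem_of_mem ha
    have hilen : r + i < xs.length := by
      have := hi; simp [List.length_drop] at this; omega
    rw [← hEq, List.getElem_drop]
    exact h2 (r + i) hilen (by omega)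
  rw [htake, hdrop, List.length_take]
  omega

lemma bisectLeft_eq_countP (xs : List Int) (a : Int) (hs : xs.Pairwise (· ≤ ·)) :
    PySem.List.bisectLeft xs a = xs.countP (fun y => decide (y < a)) := by
  obtain ⟨hle, hpre, hsuf⟩ := PySem.List.bisectLeft_spec xs a hs
  refine (countP_of_bounds xs _ _ hle ?_ ?_).symm
  · intro j hj hjr; simpa using hpre j hj hjr
  · intro j hj hjr; simpa using not_lt.mpr (hsuf j hj hjr)

lemma bisectRight_eq_countP (xs : List Int) (a : Int) (hs : xs.Pairwise (· ≤ ·)) :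
    ((xs.length : Int) - (PySem.List.bisectRight xs a : Int)) = ((xs.countP (fun y => decide (a < y)) : Nat) : Int) := by
  obtain ⟨hle, hpre, hsuf⟩ := PySem.List.bisectRight_spec xs a hs
  have h1 : xs.countP (fun y => ! decide (a < y)) = PySem.List.bisectRight xs a := by
    refine countP_of_bounds xs _ _ hle ?_ ?_
    · intro j hj hjr; simpa using not_lt.mpr (hpre j hj hjr)
    · intro j hj hjr; simpa using hsuf j hj hjr
  have h2 := List.length_eq_countP_add_countP (l := xs) (p := fun y => decide (a < y))
  simp only [decide_not, decide_eq_true_eq] at h1 h2 ⊢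
  omega

lemma count_map_add (l : List Int) (s x : Int) : (l.map (fun y => s + y)).count x = l.count (x - s) := by
  have hx : x = s + (x - s) := by ring
  conv_lhs => rw [hx]
  rw [List.count_map_of_injective l _ (fun u v huv => by omega)]

lemma sum_ite_key (keys : List Int) (hn : keys.Nodup) (x : Int) (g : Int → Int) (hx : x ∈ keys) :
    (keys.map (fun k => if k = x then g k else 0)).sum = g x := by
  induction keys with
  | nil => cases hx
  | cons k ks ih =>
    rcases List.nodup_cons.mp hn with ⟨hk, hks⟩
    rcases List.mem_cons.mp hx with h | h
    · subst h
      have hz : (ks.map (fun k' => if k' = x then g k' else 0)).sum = 0 := by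
        apply List.sum_eq_zero
        intro y hy
        obtain ⟨k', hk', hEq⟩ := List.mem_map.mp hy
        have hne : k' ≠ x := fun hq => hk (hq ▸ hk')
        simp [hne] at hEq
        omega
      simp [hz]
    · have hkx : k ≠ x := fun hEq => hk (hEq ▸ h)
      simp [hkx, ih hks h]

-- Σ_{k ∈ keys} count_L(k) · g(k) = Σ_{s ∈ L} g(s)  (keys nodup and covering L)
lemma sum_count_mul (keys : List Int) (hn : keys.Nodup) (L : List Int)
    (hsub : ∀ x ∈ L, x ∈ keys) (g : Int → Int) :
    (keys.map (fun k => (L.count k : Int) * g k)).sum = (L.map g).sum := by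
  induction L with
  | nil => simp
  | cons x L ih =>
    have hx : x ∈ keys := hsub x List.mem_cons_self
    have hsub' : ∀ y ∈ L, y ∈ keys := fun y hy => hsub y (List.mem_cons_of_mem _ hy)
    have hstep : ∀ k ∈ keys, ((x :: L).count k : Int) * g k
        = (L.count k : Int) * g k + (if k = x then g k else 0) := by
      intro k _
      rw [List.count_cons]
      by_cases hkx : k = x
      · simp [hkx, add_mul]
      · have hne : ¬ (x == k) = true := by simpa using fun hEq => hkx hEq.symm
        simp [hne, hkx]
    calc (keys.map (fun k => ((x :: L).count k : Int) * g k)).sum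
        = (keys.map (fun k => (L.count k : Int) * g k + (if k = x then g k else 0))).sum := by
          exact congrArg List.sum (List.map_congr_left hstep)
      _ = (keys.map (fun k => (L.count k : Int) * g k)).sum
            + (keys.map (fun k => if k = x then g k else 0)).sum :=
          PySem.List.sum_map_add_int keys _ _
      _ = (L.map g).sum + g x := by rw [ih hsub', sum_ite_key keys hn x g hx]
      _ = ((x :: L).map g).sum := by simp [add_comm]

lemma getD_foldl_insertAdd (l : List (Int × Int)) (d : PySem.Dict Int Int) (x : Int) :
    (l.foldl (fun d p => d.insert p.1 (d.getD p.1 0 + p.2)) d).getD x 0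
      = d.getD x 0 + ((l.filter (fun p => p.1 = x)).map (fun p => p.2)).sum := by
  induction l generalizing d with
  | nil => simp
  | cons p l ih =>
    simp only [List.foldl_cons]
    rw [ih]
    by_cases hpx : p.1 = x
    · rw [hpx, PySem.Dict.getD_insert_self]
      simp [hpx, add_assoc]
    · rw [PySem.Dict.getD_insert_of_ne d _ _ (fun hEq => hpx hEq.symm)]
      simp [hpx]

lemma rep_mem_keys {h : PySem.Dict Int Int} {L : List Int} (hr : HistRep h L) {x : Int} (hx : x ∈ L) :
    x ∈ h.keys := by
  by_contra hk
  have hcon : h.contains x = false := by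
    simp only [PySem.Dict.contains, List.any_eq_false]
    intro p hp
    simp only [beq_iff_eq]
    intro hEq
    exact hk (hEq ▸ List.mem_map_of_mem hp)
  have h0 : h.getD x 0 = 0 := PySem.Dict.getD_of_not_contains h 0 hcon
  rw [hr.2 x] at h0
  have := List.count_pos_iff.mpr hx
  omega

lemma rep_init : HistRep (PySem.Dict.empty.insert 0 1) [0] := by
  constructor
  · decide
  · intro x
    by_cases hx : x = 0
    · subst hx; rw [PySem.Dict.getD_insert_self]; simp
    · rw [PySem.Dict.getD_insert_of_ne _ _ _ hx, PySem.Dict.getD_empty]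
      simp [List.count_singleton, hx, Ne.symm hx]

lemma sum_flatMap_int {α : Type} (l : List α) (f : α → List Int) :
    (l.flatMap f).sum = (l.map (fun x => (f x).sum)).sum := by
  induction l with
  | nil => simp
  | cons a l ih => simp [ih]

lemma filter_flatMap {α β : Type} (l : List α) (f : α → List β) (p : β → Bool) :
    (l.flatMap f).filter p = l.flatMap (fun a => (f a).filter p) := by
  induction l with
  | nil => simp
  | cons a l ih => simp [List.filter_append, ih]

lemma count_flatMap_int {α : Type} (l : List α) (f : α → List Int) (x : Int) :
    (((l.flatMap f).count x : Nat) : Int) = (l.map (fun s => (((f s).count x : Nat) : Int))).sum := by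
  induction l with
  | nil => simp
  | cons a l ih =>
    simp only [List.flatMap_cons, List.count_append, List.map_cons, List.sum_cons]
    push_cast
    rw [ih]

lemma pair_filter_sum (faces : List Int) (s c x : Int) :
    (((faces.map (fun f => (s + f, c))).filter (fun q => q.1 = x)).map (fun q => q.2)).sum
      = c * ((faces.count (x - s) : Nat) : Int) := by
  induction faces with
  | nil => simp
  | cons f fs ih =>
    simp only [List.map_cons, List.filter_cons]
    by_cases hf : s + f = x
    · have hfx : (f == x - s) = true := by simp; omega
      simp only [hf, decide_true, if_true, List.map_cons, List.sum_cons,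
        List.count_cons, hfx, if_true, ih]
      push_cast
      ring
    · have hfx : ¬ ((f == x - s) = true) := by simp; omega
      simp only [hf, decide_false, if_false, List.count_cons]
      simp [hfx]
      exact ih

lemma sum_filter_ite {α : Type} (l : List α) (p : α → Bool) (g : α → Int) :
    ((l.filter p).map g).sum = (l.map (fun k => if p k then g k else 0)).sum := by
  induction l with
  | nil => simp
  | cons a l ih =>
    by_cases hp : p a <;> simp [List.filter_cons, hp, ih]

lemma convStep_eq (h : PySem.Dict Int Int) (faces : List Int) :
    convStep h faces
      = (h.items.flatMap (fun p => faces.map (fun f => (p.1 + f, p.2)))).foldl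
          (fun d q => d.insert q.1 (d.getD q.1 0 + q.2)) PySem.Dict.empty := by
  unfold convStep
  rw [List.foldl_flatMap]
  congr 1
  funext d p
  rw [List.foldl_map]

lemma rep_step {h : PySem.Dict Int Int} {L : List Int} (hr : HistRep h L) (faces : List Int) :
    HistRep (convStep h faces) (L.flatMap (fun s => faces.map (fun f => s + f))) := by
  have hitems : h.items = h.keys.map (fun k => (k, h.getD k 0)) :=
    PySem.Dict.items_eq_map_keys h hr.1 0
  constructor
  · rw [convStep_eq]
    exact PySem.Dict.nodup_keys_foldl_insert_key _ (fun q : Int × Int => q.1)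
      (fun (d : PySem.Dict Int Int) (q : Int × Int) => d.getD q.1 0 + q.2) _
      (by simp [PySem.Dict.keys_empty])
  · intro x
    rw [convStep_eq, getD_foldl_insertAdd, PySem.Dict.getD_empty, zero_add,
        filter_flatMap, List.map_flatMap, sum_flatMap_int]
    have hstep : ∀ p ∈ h.items,
        ((((faces.map (fun f => (p.1 + f, p.2))).filter (fun q => decide (q.1 = x))).map (fun q => q.2)).sum : Int)
          = p.2 * ((faces.count (x - p.1) : Nat) : Int) := by
      intro p _
      exact pair_filter_sum faces p.1 p.2 x
    rw [List.map_congr_left hstep, hitems, List.map_map]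
    have hvals : ∀ k ∈ h.keys,
        ((fun p : Int × Int => p.2 * ((faces.count (x - p.1) : Nat) : Int)) ∘ fun k => (k, h.getD k 0)) k
          = (L.count k : Int) * ((faces.count (x - k) : Nat) : Int) := by
      intro k _
      simp only [Function.comp]
      rw [hr.2 k]
    rw [List.map_congr_left hvals,
        sum_count_mul h.keys hr.1 L (fun y hy => rep_mem_keys hr hy) (fun s => ((faces.count (x - s) : Nat) : Int)),
        count_flatMap_int]
    apply congrArg
    apply List.map_congr_left
    intro s _
    rw [count_map_add]

-- the left convolution fold of sum-lists is the Cartesian-product sums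
lemma foldl_conv_eq (ls : List (List Int)) (acc : List Int) :
    ls.foldl (fun acc l => acc.flatMap (fun s => l.map (fun f => s + f))) acc
      = acc.flatMap (fun s => (prodSums ls).map (fun t => s + t)) := by
  induction ls generalizing acc with
  | nil =>
    simp [prodSums, pyProduct]
  | cons l ls ih =>
    simp only [List.foldl_cons]
    rw [ih]
    simp only [prodSums, pyProduct, List.map_flatMap, List.flatMap_map, List.map_map,
      List.flatMap_assoc, Function.comp_def, List.sum_cons]
    simp [add_assoc]

lemma rep_hist (dice : List (List Int)) (combo : List Int) :
    HistRep (convHist dice combo) (prodSums (facesOf dice combo)) := by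
  have hfold : ∀ (fl : List (List Int)) (h : PySem.Dict Int Int) (L : List Int), HistRep h L →
      HistRep (fl.foldl convStep h)
        (fl.foldl (fun acc l => acc.flatMap (fun s => l.map (fun f => s + f))) L) := by
    intro fl
    induction fl with
    | nil => intro h L hr; exact hr
    | cons l fl ih => intro h L hr; exact ih _ _ (rep_step hr l)
  have h0 := hfold (facesOf dice combo) _ _ rep_init
  rw [foldl_conv_eq] at h0
  have hmap : convHist dice combo = (facesOf dice combo).foldl convStep (PySem.Dict.empty.insert 0 1) := by
    unfold convHist facesOf
    rw [List.foldl_map]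
  rw [hmap]
  simpa using h0

lemma take_countP_sorted (kl : List Int) (s : Int) (hs : kl.Pairwise (· ≤ ·)) :
    kl.take (kl.countP (fun y => decide (y < s))) = kl.filter (fun y => decide (y < s)) := by
  induction kl with
  | nil => simp
  | cons k kt ih =>
    rcases List.pairwise_cons.mp hs with ⟨hk, hkt⟩
    by_cases hks : k < s
    · simp only [List.countP_cons, List.filter_cons, hks, decide_true, if_true]
      simp only [List.take_succ_cons]
      rw [ih hkt]
    · have hz : kt.countP (fun y => decide (y < s)) = 0 := by
        rw [List.countP_eq_zero]
        intro y hy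
        have := hk y hy
        simp only [decide_eq_true_eq]
        omega
      have hzf : kt.filter (fun y => decide (y < s)) = [] := by
        rw [List.filter_eq_nil_iff]
        intro y hy
        have := hk y hy
        simp only [decide_eq_true_eq]
        omega
      simp [List.countP_cons, List.filter_cons, hks, hz, hzf]

-- Σ over the distinct values below s of their multiplicities = countP
lemma sum_counts_filter (keys : List Int) (hn : keys.Nodup) (B : List Int)
    (hsub : ∀ x ∈ B, x ∈ keys) (s : Int) :
    ((keys.filter (fun y => decide (y < s))).map (fun k => (B.count k : Int))).sum
      = ((B.countP (fun y => decide (y < s)) : Nat) : Int) := by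
  rw [sum_filter_ite]
  have hv : ∀ k ∈ keys, (if decide (k < s) = true then (B.count k : Int) else 0)
      = (B.count k : Int) * (if k < s then 1 else 0) := by
    intro k _
    by_cases hk : k < s <;> simp [hk]
  rw [List.map_congr_left hv, sum_count_mul keys hn B hsub (fun k => if k < s then 1 else 0)]
  have hv2 : ∀ y : Int, (if y < s then (1 : Int) else 0)
      = (if (fun z => decide (z < s)) y = true then 1 else 0) := by
    intro y; by_cases hy : y < s <;> simp [hy]
  rw [List.map_congr_left (fun y _ => hv2 y), PySem.List.sum_map_ite_one_zero]

lemma scan_go (h : PySem.Dict Int Int) (kl : List Int) :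
    ∀ (run : Int) (pre : List Int),
    (kl.foldl (fun (st : Int × List Int) k => (st.1 + h.getD k 0, st.2 ++ [st.1 + h.getD k 0])) (run, pre)).2
      = pre ++ (List.range kl.length).map
          (fun t => run + (((kl.take (t + 1)).map (fun k => h.getD k 0)).sum)) := by
  induction kl with
  | nil => intro run pre; simp
  | cons k kt ih =>
    intro run pre
    simp only [List.foldl_cons]
    rw [ih]
    rw [List.length_cons, List.range_succ_eq_map, List.map_cons, List.map_map]
    simp only [List.take_succ_cons, List.map_cons, List.sum_cons, List.append_assoc,
      List.singleton_append, Function.comp_def]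
    congr 2
    all_goals first
      | (apply List.map_congr_left; intro t _; ring)
      | simp

lemma pref_getD (h : PySem.Dict Int Int) (idx : Nat) (hidx : idx ≤ (sortedKeys h).length) :
    PySem.List.pyGetD (prefOf h) ((idx : Nat) : Int) 0
      = (((sortedKeys h).take idx).map (fun k => h.getD k 0)).sum := by
  unfold prefOf
  rw [scan_go]
  rw [PySem.List.pyGetD_natCast]
  cases idx with
  | zero => simp
  | succ t =>
    have ht : t < (sortedKeys h).length := by omega
    rw [List.getD_eq_getElem _ _ (by simp [ht])]
    rw [List.getElem_append_right (by simp)]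
    simp [ht]

lemma beats_eq {hi hj : PySem.Dict Int Int} {A B : List Int} (hA : HistRep hi A) (hB : HistRep hj B) :
    beats (hi, sortedKeys hi, prefOf hi) (hj, sortedKeys hj, prefOf hj) = pairWins A B := by
  unfold beats
  simp only []
  have hsorted : (sortedKeys hj).Pairwise (· ≤ ·) := by
    have := PySem.List.sorted_pairwise (xs := hj.keys) (key := fun x : Int => x)
    simpa [sortedKeys] using this
  have hpermj : (sortedKeys hj).Perm hj.keys := PySem.List.sorted_perm _ _ _
  have hpermi : (sortedKeys hi).Perm hi.keys := PySem.List.sorted_perm _ _ _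
  have hjn : (sortedKeys hj).Nodup := hpermj.nodup_iff.mpr hB.1
  have hsubj : ∀ x ∈ B, x ∈ sortedKeys hj := fun x hx => hpermj.mem_iff.mpr (rep_mem_keys hB hx)
  -- the inner lookup is the weighted count of smaller opposing sums
  have hlook : ∀ s : Int,
      PySem.List.pyGetD (prefOf hj) ((PySem.List.bisectLeft (sortedKeys hj) s : Nat) : Int) 0
        = ((B.countP (fun y => decide (y < s)) : Nat) : Int) := by
    intro s
    rw [bisectLeft_eq_countP _ _ hsorted]
    rw [pref_getD hj _ List.countP_le_length]
    rw [take_countP_sorted _ _ hsorted]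
    have : (((sortedKeys hj).filter (fun y => decide (y < s))).map (fun k => hj.getD k 0))
        = (((sortedKeys hj).filter (fun y => decide (y < s))).map (fun k => (B.count k : Int))) := by
      apply List.map_congr_left
      intro k _
      exact hB.2 k
    rw [this, sum_counts_filter _ hjn B hsubj s]
  rw [PySem.List.foldl_add]
  simp only [zero_add]
  have hterm : ∀ s ∈ sortedKeys hi,
      hi.getD s 0 * PySem.List.pyGetD (prefOf hj) ((PySem.List.bisectLeft (sortedKeys hj) s : Nat) : Int) 0
        = (A.count s : Int) * ((B.countP (fun y => decide (y < s)) : Nat) : Int) := by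
    intro s _
    rw [hlook s, hA.2 s]
  rw [List.map_congr_left hterm]
  have hperm2 : ((sortedKeys hi).map
      (fun s => (A.count s : Int) * ((B.countP (fun y => decide (y < s)) : Nat) : Int))).sum
      = (hi.keys.map
      (fun s => (A.count s : Int) * ((B.countP (fun y => decide (y < s)) : Nat) : Int))).sum :=
    (hpermi.map _).sum_eq
  rw [hperm2, sum_count_mul hi.keys hA.1 A (fun y hy => rep_mem_keys hA hy)
    (fun a => ((B.countP (fun y => decide (y < a)) : Nat) : Int))]
  rfl

lemma pairWins_perm {A A' B B' : List Int} (hA : A'.Perm A) (hB : B'.Perm B) :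
    pairWins A' B' = pairWins A B := by
  unfold pairWins
  have hmap : ∀ a ∈ A', ((B'.countP (fun y => decide (y < a)) : Nat) : Int)
      = ((B.countP (fun y => decide (y < a)) : Nat) : Int) := by
    intro a _
    rw [hB.countP_eq]
  rw [List.map_congr_left hmap]
  exact (hA.map _).sum_eq

lemma pairWins_nonneg (A B : List Int) : 0 ≤ pairWins A B := by
  unfold pairWins
  apply List.sum_nonneg
  intro x hx
  obtain ⟨a, _, rfl⟩ := List.mem_map.mp hx
  positivity

-- Σ_{a ∈ A} #{b ∈ B | a < b}  =  Σ_{b ∈ B} #{a ∈ A | a < b}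
lemma sum_lose_eq_pairWins (A B : List Int) :
    (A.map (fun a => ((B.countP (fun y => decide (a < y)) : Nat) : Int))).sum = pairWins B A := by
  induction A with
  | nil => simp [pairWins]
  | cons a A ih =>
    simp only [List.map_cons, List.sum_cons]
    rw [ih]
    unfold pairWins
    have hstep : ∀ b ∈ B, (((a :: A).countP (fun y => decide (y < b)) : Nat) : Int)
        = ((A.countP (fun y => decide (y < b)) : Nat) : Int)
          + (if (fun z => decide (a < z)) b = true then 1 else 0) := by
      intro b _
      rw [List.countP_cons]
      by_cases hab : a < b
      · push_cast; simp [hab]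
      · push_cast; simp [hab]
    rw [List.map_congr_left hstep, PySem.List.sum_map_add_int, PySem.List.sum_map_ite_one_zero]
    ring

lemma pySetD_neg_natCast {α : Type} (xs : List α) (k : Nat) (v : α) (h1 : 0 < k) (h2 : k ≤ xs.length) :
    PySem.List.pySetD xs (-(k : Int)) v = xs.set (xs.length - k) v := by
  unfold PySem.List.pySetD PySem.List.pySet? PySem.List.pyIdx?
  have h0 : ¬ (0 ≤ -(k : Int)) := by omega
  have hle : -(xs.length : Int) ≤ -(k : Int) := by omega
  have hk0 : ¬ k = 0 := by omega
  simp [h0, hle, hk0]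

lemma enumerate_map {α β : Type} (xs : List α) (f : α → β) (s : Int) :
    PySem.List.enumerate (xs.map f) s = (PySem.List.enumerate xs s).map (fun p => (p.1, f p.2)) := by
  induction xs generalizing s with
  | nil => simp [PySem.List.enumerate_nil]
  | cons x xs ih => simp [PySem.List.enumerate_cons, ih]

lemma foldl_max_mem (xs : List Int) (a : Int) : xs.foldl max a = a ∨ xs.foldl max a ∈ xs := by
  induction xs generalizing a with
  | nil => left; rfl
  | cons x xs ih =>
    rcases ih (max a x) with h | h
    · by_cases hax : x ≤ a
      · left; simp only [List.foldl_cons] at *; rw [h]; omega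
      · right; simp only [List.foldl_cons]; rw [h]
        have : max a x = x := by omega
        rw [this]; exact List.mem_cons_self
    · right; exact List.mem_cons_of_mem _ h

lemma max?_cons (xs : List Int) : ∀ m : Int, PySem.List.max? (m :: xs) (fun x => x) = some (xs.foldl max m) := by
  induction xs with
  | nil => intro m; rfl
  | cons x xs ih =>
    intro m
    have h1 : PySem.List.max? (m :: x :: xs) (fun y => y) = PySem.List.max? (max m x :: xs) (fun y => y) := by
      unfold PySem.List.max?
      simp only [List.foldl_cons]
      congr 1
      by_cases h : m < x
      · simp [h]; omega
      · simp [h]; omega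
    rw [h1, ih (max m x)]
    simp

lemma maxD_eq_foldl (W : List Int) (h0 : ∀ x ∈ W, 0 ≤ x) :
    (PySem.List.max? W (fun x => x)).getD 0 = W.foldl max 0 := by
  cases W with
  | nil => rfl
  | cons x xs =>
    have hx : 0 ≤ x := h0 x List.mem_cons_self
    rw [max?_cons]
    simp only [Option.getD_some, List.foldl_cons]
    have hmx : max 0 x = x := by omega
    rw [hmx]

lemma am_char (W : List Int) (h0 : ∀ x ∈ W, 0 ≤ x) :
    ((PySem.List.enumerate W 0).foldl (fun (st : Int × Int) p => if p.2 > st.2 then (p.1, p.2) else st) ((0 : Int), (0 : Int)))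
      = ((((PySem.List.index? W (W.foldl max 0)).getD 0 : Nat) : Int), W.foldl max 0) := by
  induction W using List.reverseRecOn with
  | nil => rfl
  | append_singleton xs x ih =>
    have h0xs : ∀ y ∈ xs, 0 ≤ y := fun y hy => h0 y (List.mem_append_left _ hy)
    have hx : 0 ≤ x := h0 x (List.mem_append_right _ List.mem_cons_self)
    have hM := PySem.List.le_foldl_max xs (0 : Int)
    rw [PySem.List.enumerate_append, List.foldl_append, ih h0xs]
    simp only [PySem.List.enumerate_cons, PySem.List.enumerate_nil, List.foldl_cons, List.foldl_nil]
    rw [List.foldl_append]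
    simp only [List.foldl_cons, List.foldl_nil]
    by_cases hgt : x > xs.foldl max 0
    · have hnotmem : x ∉ xs := fun hmem => by have := hM.2 x hmem; omega
      have hmx : max (xs.foldl max 0) x = x := by omega
      rw [hmx, PySem.List.index?_append_singleton_self _ _ hnotmem]
      simp [hgt]
    · have hmx : max (xs.foldl max 0) x = xs.foldl max 0 := by omega
      simp only [hgt, if_false, hmx]
      rcases foldl_max_mem xs 0 with hz | hmem
      · -- foldl max = 0 : every element of xs is 0 and x = 0
        have hx0 : x = 0 := by
          rw [hz] at hgt; omega
        rw [hz]
        cases xs with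
        | nil =>
          subst hx0
          simp [PySem.List.index?_cons_self]
        | cons y ys =>
          have hy0 : y = 0 := by
            have h1 := (PySem.List.le_foldl_max (y :: ys) (0:Int)).2 y List.mem_cons_self
            have h2 := h0xs y List.mem_cons_self
            rw [hz] at h1; omega
          subst hy0
          subst hx0
          simp [List.cons_append, PySem.List.index?_cons_self]
      · rw [PySem.List.index?_append_of_mem _ hmem]

-- proof-layer names for the two loop bodies (definitionally equal to the ports' lambdas)
def aStep (bs : List Int) (i : Int) (r : List (Int × Int)) (a : Int) : List (Int × Int) :=
  let r1 := PySem.List.pySetD r i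
    ((PySem.List.pyGetD r i (0, 0)).1 + ↑(PySem.List.bisectLeft bs a),
     (PySem.List.pyGetD r i (0, 0)).2 + ((bs.length : Int) - ↑(PySem.List.bisectRight bs a)))
  PySem.List.pySetD r1 (-(i + 1))
    ((PySem.List.pyGetD r1 (-(i + 1)) (0, 0)).1 + ((bs.length : Int) - ↑(PySem.List.bisectRight bs a)),
     (PySem.List.pyGetD r1 (-(i + 1)) (0, 0)).2 + ↑(PySem.List.bisectLeft bs a))

def aBody (S : List (List Int)) (res : List (Int × Int)) (i : Int) : List (Int × Int) :=
  (PySem.List.pyGetD S i []).foldl (fun r a => aStep (PySem.List.pyGetD S (-(i + 1)) []) i r a) res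

def bBody (D : List (PySem.Dict Int Int × List Int × List Int)) (C : Nat) (w : List Int) (i : Int) : List Int :=
  PySem.List.pySetD
    (PySem.List.pySetD w i
      (beats (PySem.List.pyGetD D i (PySem.Dict.empty, [], []))
             (PySem.List.pyGetD D ((C : Int) - 1 - i) (PySem.Dict.empty, [], []))))
    ((C : Int) - 1 - i)
    (beats (PySem.List.pyGetD D ((C : Int) - 1 - i) (PySem.Dict.empty, [], []))
           (PySem.List.pyGetD D i (PySem.Dict.empty, [], [])))

def WA (bs as : List Int) : Int := (as.map (fun a => (↑(PySem.List.bisectLeft bs a) : Int))).sum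
def LA (bs as : List Int) : Int := (as.map (fun a => ((bs.length : Int) - ↑(PySem.List.bisectRight bs a)))).sum

lemma getD_set_self {α : Type} (l : List α) (i : Nat) (v d : α) (h : i < l.length) :
    (l.set i v).getD i d = v := by
  simp [List.getD_eq_getElem?_getD, List.getElem?_set_self h]

lemma getD_set_ne {α : Type} (l : List α) (i jdx : Nat) (v d : α) (h : jdx ≠ i) :
    (l.set jdx v).getD i d = l.getD i d := by
  simp [List.getD_eq_getElem?_getD, List.getElem?_set_ne h]

lemma aStep_char (bs : List Int) (m : Nat) (r : List (Int × Int)) (a : Int)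
    (hm : m + 1 ≤ r.length) (hne : r.length - (m + 1) ≠ m) :
    aStep bs (↑m) r a
      = (r.set m ((r.getD m (0, 0)).1 + ↑(PySem.List.bisectLeft bs a),
                  (r.getD m (0, 0)).2 + ((bs.length : Int) - ↑(PySem.List.bisectRight bs a)))).set
          (r.length - (m + 1))
          ((r.getD (r.length - (m + 1)) (0, 0)).1 + ((bs.length : Int) - ↑(PySem.List.bisectRight bs a)),
           (r.getD (r.length - (m + 1)) (0, 0)).2 + ↑(PySem.List.bisectLeft bs a)) := by
  unfold aStep
  have hc : (-((↑m : Int) + 1)) = -(((m + 1 : Nat)) : Int) := by push_cast; ring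
  simp only [PySem.List.pySetD_natCast, PySem.List.pyGetD_natCast, hc]
  rw [PySem.List.pyGetD_neg_natCast _ (m + 1) _ (by omega) (by simp; omega)]
  rw [pySetD_neg_natCast _ (m + 1) _ (by omega) (by simp; omega)]
  simp only [List.length_set]
  have hjn : r.length - (m + 1) < r.length := by omega
  rw [List.getElem_set_ne (by omega) , ← List.getD_eq_getElem r (0, 0) hjn]

lemma inner_char (bs : List Int) (m : Nat) (as : List Int) :
    ∀ (res : List (Int × Int)), m + 1 ≤ res.length → res.length - (m + 1) ≠ m →
    as.foldl (fun r a => aStep bs (↑m) r a) res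
      = (res.set m ((res.getD m (0, 0)).1 + WA bs as, (res.getD m (0, 0)).2 + LA bs as)).set
          (res.length - (m + 1))
          ((res.getD (res.length - (m + 1)) (0, 0)).1 + LA bs as,
           (res.getD (res.length - (m + 1)) (0, 0)).2 + WA bs as) := by
  induction as with
  | nil =>
    intro res hm hne
    have hmlt : m < res.length := by omega
    have hjlt : res.length - (m + 1) < res.length := by omega
    simp only [List.foldl_nil, WA, LA, List.map_nil, List.sum_nil, add_zero]
    rw [List.getD_eq_getElem res (0, 0) hmlt, List.getD_eq_getElem res (0, 0) hjlt]
    rw [List.set_getElem_self, List.set_getElem_self]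
  | cons a as ih =>
    intro res hm hne
    simp only [List.foldl_cons]
    rw [aStep_char bs m res a hm hne]
    have hlen : (((res.set m ((res.getD m (0, 0)).1 + ↑(PySem.List.bisectLeft bs a),
          (res.getD m (0, 0)).2 + ((bs.length : Int) - ↑(PySem.List.bisectRight bs a)))).set
          (res.length - (m + 1))
          ((res.getD (res.length - (m + 1)) (0, 0)).1 + ((bs.length : Int) - ↑(PySem.List.bisectRight bs a)),
           (res.getD (res.length - (m + 1)) (0, 0)).2 + ↑(PySem.List.bisectLeft bs a)))).length = res.length := by
      simp
    rw [ih _ (by rw [hlen]; exact hm) (by rw [hlen]; exact hne)]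
    rw [hlen]
    have hmlt : m < res.length := by omega
    have hjlt : res.length - (m + 1) < res.length := by omega
    have hnm : res.length - (m + 1) ≠ m := hne
    rw [getD_set_ne _ m _ _ _ hnm, getD_set_self _ m _ _ hmlt,
        getD_set_self _ (res.length - (m + 1)) _ _ (by simp; omega)]
    have hWA : WA bs (a :: as) = ↑(PySem.List.bisectLeft bs a) + WA bs as := by
      simp [WA]
    have hLA : LA bs (a :: as) = ((bs.length : Int) - ↑(PySem.List.bisectRight bs a)) + LA bs as := by
      simp [LA]
    rw [hWA, hLA]
    apply List.ext_getElem?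
    intro i
    by_cases him : i = m
    · subst him
      rw [List.getElem?_set_ne (by omega), List.getElem?_set_self (by simp; omega),
          List.getElem?_set_ne (by omega), List.getElem?_set_self (by omega)]
      simp only [Option.some.injEq, Prod.mk.injEq]
      constructor <;> ring
    · by_cases hij : i = res.length - (m + 1)
      · subst hij
        rw [List.getElem?_set_self (by simp; omega), List.getElem?_set_self (by simp; omega)]
        simp only [Option.some.injEq, Prod.mk.injEq]
        constructor <;> ring
      · simp only [List.getElem?_set_ne (Ne.symm him), List.getElem?_set_ne (Ne.symm hij)]

lemma step_agree (dice : List (List Int)) (CB : List (List Int)) (S : List (List Int))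
    (D : List (PySem.Dict Int Int × List Int × List Int))
    (hS : S = CB.map (fun cdn => PySem.List.sorted (prodSums (facesOf dice cdn)) (fun x => x) false))
    (hH : D = CB.map (fun combo => comboData dice combo))
    (m : Nat) (res : List (Int × Int)) (w : List Int)
    (hmlt : m < CB.length / 2) (hlen : res.length = CB.length) (hw : res.map Prod.fst = w)
    (hf1 : res.getD m ((0 : Int), (0 : Int)) = (0, 0))
    (hf2 : res.getD (CB.length - 1 - m) ((0 : Int), (0 : Int)) = (0, 0))
    (hnn : ∀ x ∈ w, 0 ≤ x) :
    (aBody S res (↑m)).map Prod.fst = bBody D CB.length w (↑m)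
      ∧ (aBody S res (↑m)).length = CB.length
      ∧ (∀ m' : Nat, m' ≠ m → m' ≠ CB.length - 1 - m →
          (aBody S res (↑m)).getD m' ((0 : Int), (0 : Int)) = res.getD m' ((0 : Int), (0 : Int)))
      ∧ (∀ x ∈ bBody D CB.length w (↑m), 0 ≤ x) := by
  have hC2 : 2 ≤ CB.length := by omega
  set C := CB.length with hCdef
  have hjn : C - 1 - m = C - (m + 1) := by omega
  have hmC : m < C := by omega
  have hjC : C - 1 - m < C := by omega
  have hne : C - (m + 1) ≠ m := by omega
  have hSlen : S.length = C := by rw [hS, List.length_map, hCdef]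
  have hHlen : D.length = C := by rw [hH, List.length_map, hCdef]
  -- the two selected sorted sum lists / histograms
  have hcast : (-((↑m : Int) + 1)) = -(((m + 1 : Nat)) : Int) := by push_cast; ring
  have hAs : PySem.List.pyGetD S (↑m) [] = S[m]'(by omega) := by
    rw [PySem.List.pyGetD_natCast, List.getD_eq_getElem S [] (by omega)]
  have hBs : PySem.List.pyGetD S (-((↑m : Int) + 1)) [] = S[C - 1 - m]'(by omega) := by
    rw [hcast, PySem.List.pyGetD_neg_natCast _ (m + 1) _ (by omega) (by omega)]
    simp only [hSlen, hjn]
  have hHm : PySem.List.pyGetD D (↑m) (PySem.Dict.empty, [], []) = D[m]'(by omega) := by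
    rw [PySem.List.pyGetD_natCast, List.getD_eq_getElem D (PySem.Dict.empty, [], []) (by omega)]
  have hcastj : ((C : Int) - 1 - (↑m : Int)) = (((C - 1 - m : Nat)) : Int) := by push_cast; omega
  have hHj : PySem.List.pyGetD D ((C : Int) - 1 - (↑m : Int)) (PySem.Dict.empty, [], []) = D[C - 1 - m]'(by omega) := by
    rw [hcastj, PySem.List.pyGetD_natCast, List.getD_eq_getElem D (PySem.Dict.empty, [], []) (by omega)]
  have hSm : S[m]'(by omega) = PySem.List.sorted (prodSums (facesOf dice (CB[m]'(by omega)))) (fun x => x) false := by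
    subst hS; simp
  have hSj : S[C - 1 - m]'(by omega)
      = PySem.List.sorted (prodSums (facesOf dice (CB[C - 1 - m]'(by omega)))) (fun x => x) false := by
    subst hS; simp
  have hHm' : D[m]'(by omega) = comboData dice (CB[m]'(by omega)) := by subst hH; simp
  have hHj' : D[C - 1 - m]'(by omega) = comboData dice (CB[C - 1 - m]'(by omega)) := by subst hH; simp
  set LM := prodSums (facesOf dice (CB[m]'(by omega))) with hLM
  set LJ := prodSums (facesOf dice (CB[C - 1 - m]'(by omega))) with hLJ
  set SM := PySem.List.sorted LM (fun x : Int => x) false with hSMdef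
  set SJ := PySem.List.sorted LJ (fun x : Int => x) false with hSJdef
  have hSJsorted : SJ.Pairwise (· ≤ ·) := by
    have := PySem.List.sorted_pairwise (xs := LJ) (key := fun x : Int => x)
    simpa [hSJdef] using this
  -- the per-element counts turn into pairWins
  have hWAeq : WA SJ SM = pairWins LM LJ := by
    have h1 : WA SJ SM = pairWins SM SJ := by
      unfold WA pairWins
      apply congrArg
      apply List.map_congr_left
      intro a _
      rw [bisectLeft_eq_countP SJ a hSJsorted]
    rw [h1]
    exact pairWins_perm (PySem.List.sorted_perm _ _ _) (PySem.List.sorted_perm _ _ _)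
  have hLAeq : LA SJ SM = pairWins LJ LM := by
    have h1 : LA SJ SM = (SM.map (fun a => ((SJ.countP (fun y => decide (a < y)) : Nat) : Int))).sum := by
      unfold LA
      apply congrArg
      apply List.map_congr_left
      intro a _
      rw [bisectRight_eq_countP SJ a hSJsorted]
    rw [h1, sum_lose_eq_pairWins]
    exact pairWins_perm (PySem.List.sorted_perm _ _ _) (PySem.List.sorted_perm _ _ _)
  have hwa : beats (comboData dice (CB[m]'(by omega))) (comboData dice (CB[C - 1 - m]'(by omega))) = pairWins LM LJ :=
    beats_eq (rep_hist dice _) (rep_hist dice _)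
  have hwb : beats (comboData dice (CB[C - 1 - m]'(by omega))) (comboData dice (CB[m]'(by omega))) = pairWins LJ LM :=
    beats_eq (rep_hist dice _) (rep_hist dice _)
  -- closed form of the A inner loop
  have hA : aBody S res (↑m)
      = (res.set m (WA SJ SM, LA SJ SM)).set (C - 1 - m) (LA SJ SM, WA SJ SM) := by
    unfold aBody
    rw [hAs, hBs, hSm, hSj]
    rw [inner_char SJ m SM res (by omega) (by omega)]
    rw [hlen, ← hjn, hf1, hf2]
    simp
  -- closed form of the B body
  have hB : bBody D C w (↑m) = (w.set m (pairWins LM LJ)).set (C - 1 - m) (pairWins LJ LM) := by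
    unfold bBody
    rw [hHm, hHj, hHm', hHj', hwa, hwb, PySem.List.pySetD_natCast, hcastj, PySem.List.pySetD_natCast]
  refine ⟨?_, ?_, ?_, ?_⟩
  · rw [hA, hB, List.map_set, List.map_set, hw, hWAeq, hLAeq]
  · rw [hA]; simp [hlen]
  · intro m' h1 h2
    rw [hA, getD_set_ne _ m' _ _ _ (fun hq => h2 hq.symm), getD_set_ne _ m' _ _ _ (fun hq => h1 hq.symm)]
  · intro x hx
    rw [hB] at hx
    rcases List.mem_or_eq_of_mem_set hx with hx1 | hx1
    · rcases List.mem_or_eq_of_mem_set hx1 with hx2 | hx2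
      · exact hnn x hx2
      · rw [hx2]; exact pairWins_nonneg _ _
    · rw [hx1]; exact pairWins_nonneg _ _

lemma fold_parallel {C : Nat}
    (fA : List (Int × Int) → Nat → List (Int × Int)) (fB : List Int → Nat → List Int)
    (hstep : ∀ (m : Nat) (res : List (Int × Int)) (w : List Int), m < C / 2 → res.length = C →
      res.map Prod.fst = w →
      res.getD m ((0 : Int), (0 : Int)) = (0, 0) → res.getD (C - 1 - m) ((0 : Int), (0 : Int)) = (0, 0) →
      (∀ x ∈ w, 0 ≤ x) →
      (fA res m).map Prod.fst = fB w m ∧ (fA res m).length = C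
        ∧ (∀ m' : Nat, m' ≠ m → m' ≠ C - 1 - m →
            (fA res m).getD m' ((0 : Int), (0 : Int)) = res.getD m' ((0 : Int), (0 : Int)))
        ∧ (∀ x ∈ fB w m, 0 ≤ x)) :
    ∀ (ms : List Nat), ms.Nodup → (∀ m ∈ ms, m < C / 2) →
    ∀ (res : List (Int × Int)) (w : List Int), res.length = C → res.map Prod.fst = w →
      (∀ m ∈ ms, res.getD m ((0 : Int), (0 : Int)) = (0, 0)
        ∧ res.getD (C - 1 - m) ((0 : Int), (0 : Int)) = (0, 0)) →
      (∀ x ∈ w, 0 ≤ x) →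
      (ms.foldl fA res).map Prod.fst = ms.foldl fB w ∧ (∀ x ∈ ms.foldl fB w, 0 ≤ x) := by
  intro ms
  induction ms with
  | nil =>
    intro _ _ res w _ hw _ hnn
    exact ⟨hw, hnn⟩
  | cons m ms ih =>
    intro hnd hlt res w hlen hw hfresh hnn
    rcases List.nodup_cons.mp hnd with ⟨hm_notin, hnd'⟩
    have hmlt : m < C / 2 := hlt m List.mem_cons_self
    obtain ⟨ha, hb, hc, hd⟩ := hstep m res w hmlt hlen hw (hfresh m List.mem_cons_self).1 (hfresh m List.mem_cons_self).2 hnn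
    simp only [List.foldl_cons]
    apply ih hnd' (fun m' hm' => hlt m' (List.mem_cons_of_mem _ hm')) _ _ hb ha ?_ hd
    intro m' hm'
    have hm'lt : m' < C / 2 := hlt m' (List.mem_cons_of_mem _ hm')
    have hne1 : m' ≠ m := fun hq => hm_notin (hq ▸ hm')
    have hne2 : m' ≠ C - 1 - m := by omega
    have hne3 : C - 1 - m' ≠ m := by omega
    have hne4 : C - 1 - m' ≠ C - 1 - m := by omega
    exact ⟨(hc m' hne1 hne2).trans (hfresh m' (List.mem_cons_of_mem _ hm')).1,
           (hc (C - 1 - m') hne3 hne4).trans (hfresh m' (List.mem_cons_of_mem _ hm')).2⟩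

theorem main_core (dice : List (List Int)) (CB : List (List Int)) (S : List (List Int))
    (D : List (PySem.Dict Int Int × List Int × List Int))
    (hS : S = (CB.map (fun cdn => cdn.map (fun c => PySem.List.pyGetD dice (c - 1) []))).map
            (fun cde => PySem.List.sorted (prodSums cde) (fun x => x) false))
    (hH : D = CB.map (fun combo => comboData dice combo)) :
    ((PySem.List.enumerate
        ((PySem.List.pyRange 0 (↑(CB.length / 2)) 1).foldl (aBody S)
          ((List.range CB.length).map (fun _ => ((0 : Int), (0 : Int))))) 0).foldl
        (fun (st : Int × Int) p => if p.2.1 > st.2 then (p.1, p.2.1) else st) (0, 0)).1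
      = ↑((PySem.List.index?
            ((PySem.List.pyRange 0 (↑(CB.length / 2)) 1).foldl (bBody D CB.length)
              (List.replicate CB.length 0))
            ((PySem.List.max?
                ((PySem.List.pyRange 0 (↑(CB.length / 2)) 1).foldl (bBody D CB.length)
                  (List.replicate CB.length 0)) (fun x => x)).getD 0)).getD 0) := by
  have hS' : S = CB.map (fun cdn => PySem.List.sorted (prodSums (facesOf dice cdn)) (fun x => x) false) := by
    rw [hS, List.map_map]
    rfl
  set C := CB.length with hCdef
  have hconst : ∀ i : Nat, (((List.range C).map (fun _ => ((0 : Int), (0 : Int)))).getD i ((0 : Int), (0 : Int))) = (0, 0) := by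
    intro i
    rw [List.getD_eq_getElem?_getD]
    rcases Nat.lt_or_ge i C with h | h
    · rw [List.getElem?_eq_getElem (by simp [h])]
      simp
    · rw [List.getElem?_eq_none (by simp [h])]
      rfl
  have hrng : PySem.List.pyRange 0 (↑(C / 2)) 1 = (List.range (C / 2)).map (fun k : Nat => (k : Int)) :=
    PySem.List.pyRange_zero_natCast (C / 2)
  rw [hrng, List.foldl_map, List.foldl_map]
  have hpar := fold_parallel (C := C) (fun res m => aBody S res (↑m)) (fun w m => bBody D C w (↑m))
    (fun m res w h1 h2 h3 h4 h5 h6 => step_agree dice CB S D hS' hH m res w h1 h2 h3 h4 h5 h6)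
    (List.range (C / 2)) (List.nodup_range) (fun m hm => List.mem_range.mp hm)
    ((List.range C).map (fun _ => ((0 : Int), (0 : Int)))) (List.replicate C 0)
    (by simp) (by simp [List.map_map, Function.comp_def, List.map_const'])
    (fun m _ => ⟨hconst m, hconst _⟩)
    (fun x hx => by rw [List.eq_of_mem_replicate hx])
  obtain ⟨hmap, hnn⟩ := hpar
  have hfold : ∀ (R : List (Int × Int)),
      (PySem.List.enumerate R 0).foldl
        (fun (st : Int × Int) p => if p.2.1 > st.2 then (p.1, p.2.1) else st) (0, 0)
      = (PySem.List.enumerate (R.map Prod.fst) 0).foldl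
          (fun (st : Int × Int) p => if p.2 > st.2 then (p.1, p.2) else st) (0, 0) := by
    intro R
    rw [enumerate_map, List.foldl_map]
  rw [hfold, hmap, am_char _ hnn, maxD_eq_foldl _ hnn]

-- ===== VERDICT (by name: the statement is the Claim_ definition above) =====
theorem solution_spec : Claim_equal_solution := by
  intro dice hdom
  unfold Spec_solution
  show solution dice = solution_alt dice
  simp only [solution, solution_alt, PySem.List.len_eq, floordiv_two_nat, Int.toNat_natCast,
    range_shift]
  exact congrArg
    (fun z => PySem.List.pyGetD
      (pyCombinations (PySem.List.pyRange 1 ((dice.length : Int) + 1) 1) (dice.length / 2)) z [])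
    (main_core dice
      (pyCombinations (PySem.List.pyRange 1 ((dice.length : Int) + 1) 1) (dice.length / 2)) _ _ rfl rfl)
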